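-- pv_equiv track=rewrite | github.com/hannamlmv/kand | Visualisation/Coverage/coverage_vis.py | collect_number_of_S_I_R
-- ===== SOURCE A (Python) =====
-- def collect_number_of_S_I_R(chosen_isolates_SIR: dict, antibiotics: list) -> dict:
--     """
--     Counts every S,I,R value for every antibiotic. Returns a dictionary with the antibiotic as the key, and a list with hte counts of the S,I,R-values
--     (in that order)
--     """
--     count_isolates_SIR={}
--     for antibiotic, SIR_data in chosen_isolates_SIR.items():
--         S_count=0
--         I_count=0
--         R_count=0
--
--         for SIR in SIR_data:
--             if SIR=='S':
--                 S_count+=1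
--             if SIR=='I':
--                 I_count+=1
--             if SIR=='R':
--                 R_count+=1
--
--
--         count_isolates_SIR[antibiotic]=  list((S_count, I_count, R_count))
--     return count_isolates_SIR
-- ===== SOURCE B (Python) =====
-- def collect_number_of_S_I_R(chosen_isolates_SIR: dict, antibiotics: list) -> dict:
--     return {
--         antibiotic: [SIR_data.count('S'), SIR_data.count('I'), SIR_data.count('R')]
--         for antibiotic, SIR_data in chosen_isolates_SIR.items()
--     }
-- ===== Notes on version B (the rewrite author's own statement) =====
-- stated objective: simpler
-- what changed: Replaced the explicit dict-building loop with three mutable counters and a single combined counting pass by a dict comprehension that makes three separate list.count scans per antibiotic.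
import Mathlib
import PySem

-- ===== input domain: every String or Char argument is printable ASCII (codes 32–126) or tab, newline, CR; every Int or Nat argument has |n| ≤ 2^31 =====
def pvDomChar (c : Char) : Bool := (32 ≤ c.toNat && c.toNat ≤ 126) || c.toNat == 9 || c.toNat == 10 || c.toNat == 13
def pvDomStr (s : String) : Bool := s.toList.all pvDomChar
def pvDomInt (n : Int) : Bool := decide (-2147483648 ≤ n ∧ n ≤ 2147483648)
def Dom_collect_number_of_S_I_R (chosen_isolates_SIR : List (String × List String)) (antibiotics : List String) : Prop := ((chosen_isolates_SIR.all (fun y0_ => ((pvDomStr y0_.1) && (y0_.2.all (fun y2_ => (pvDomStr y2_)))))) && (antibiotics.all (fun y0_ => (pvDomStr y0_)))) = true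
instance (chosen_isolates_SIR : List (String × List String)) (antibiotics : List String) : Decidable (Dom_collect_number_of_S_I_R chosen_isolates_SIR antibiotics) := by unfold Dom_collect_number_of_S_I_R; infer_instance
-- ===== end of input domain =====

-- B replaces A's explicit dict-building loop with per-antibiotic mutable counters by a
-- dict comprehension using three list.count scans (objective: simpler).

-- ===== PORT A =====
-- inner 'for SIR in SIR_data' loop: three counters, three independent ifs, in order
def pvCountLoop (SIR_data : List String) : Int × Int × Int :=
  SIR_data.foldl
    (fun st SIR =>
      let st := if SIR == "S" then (st.1 + 1, st.2.1, st.2.2) else st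
      let st := if SIR == "I" then (st.1, st.2.1 + 1, st.2.2) else st
      if SIR == "R" then (st.1, st.2.1, st.2.2 + 1) else st)
    (0, 0, 0)

def collect_number_of_S_I_R (chosen_isolates_SIR : List (String × List String)) (antibiotics : List String) : List (String × List Int) :=
  (chosen_isolates_SIR.foldl
    (fun (count_isolates_SIR : PySem.Dict String (List Int)) item =>
      let c := pvCountLoop item.2
      count_isolates_SIR.insert item.1 [c.1, c.2.1, c.2.2])
    PySem.Dict.empty).items

-- ===== PORT B =====
def collect_number_of_S_I_R_alt (chosen_isolates_SIR : List (String × List String)) (antibiotics : List String) : List (String × List Int) :=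
  (chosen_isolates_SIR.foldl
    (fun (d : PySem.Dict String (List Int)) item =>
      d.insert item.1 [(PySem.List.count item.2 "S" : Int), (PySem.List.count item.2 "I" : Int), (PySem.List.count item.2 "R" : Int)])
    PySem.Dict.empty).items

-- ===== PRECONDITION & SPEC =====
def Spec_collect_number_of_S_I_R (chosen_isolates_SIR : List (String × List String)) (antibiotics : List String) (out : List (String × List Int)) : Prop := out = collect_number_of_S_I_R_alt chosen_isolates_SIR antibiotics
instance (chosen_isolates_SIR : List (String × List String)) (antibiotics : List String) (out : List (String × List Int)) : Decidable (Spec_collect_number_of_S_I_R chosen_isolates_SIR antibiotics out) := by unfold Spec_collect_number_of_S_I_R; infer_instance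

-- ===== CLAIM (what is proved, stated in full; the proofs are below) =====
def Claim_equal_collect_number_of_S_I_R : Prop := ∀ (chosen_isolates_SIR : List (String × List String)) (antibiotics : List String), Dom_collect_number_of_S_I_R chosen_isolates_SIR antibiotics → Spec_collect_number_of_S_I_R chosen_isolates_SIR antibiotics (collect_number_of_S_I_R chosen_isolates_SIR antibiotics)

-- ===== LEMMAS AND PROOFS =====

theorem pvCountLoop_eq (l : List String) :
    pvCountLoop l = ((l.count "S" : Int), (l.count "I" : Int), (l.count "R" : Int)) := by
  unfold pvCountLoop
  suffices h : ∀ (l : List String) (s i r : Int),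
      l.foldl
        (fun st SIR =>
          let st := if SIR == "S" then (st.1 + 1, st.2.1, st.2.2) else st
          let st := if SIR == "I" then (st.1, st.2.1 + 1, st.2.2) else st
          if SIR == "R" then (st.1, st.2.1, st.2.2 + 1) else st)
        (s, i, r) = (s + l.count "S", i + l.count "I", r + l.count "R") by
    simpa using h l 0 0 0
  intro l
  induction l with
  | nil => intro s i r; simp
  | cons x xs ih =>
    intro s i r
    simp only [List.foldl_cons, List.count_cons]
    by_cases hS : x = "S" <;> by_cases hI : x = "I" <;> by_cases hR : x = "R" <;>
      simp_all <;> omega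

theorem collect_number_of_S_I_R_spec : Claim_equal_collect_number_of_S_I_R := by
  intro chosen antibiotics _
  unfold Spec_collect_number_of_S_I_R collect_number_of_S_I_R collect_number_of_S_I_R_alt
  simp only [pvCountLoop_eq, PySem.List.count_eq]


-- ===== VERDICT (by name: the statement is the Claim_ definition above) =====
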